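-- pv_equiv track=rewrite | github.com/Yale-LILY/dart | evaluation/webnlg-automatic-evaluation/significance_block_creation.py | randomise_data
-- ===== SOURCE A (Python) =====
-- index_shuf_all = list(range(1, 1863))
--
-- index_shuf_old = list(range(1, 972))
--
-- index_shuf_new = list(range(1, 892))
--
-- def randomise_data(filelines, param):
--     # randomise; sort list based on numbers from another list
--     if param == 'all-cat':
--         filelines = [x for _, x in sorted(zip(index_shuf_all, filelines))]
--     elif param == 'old-cat':
--         filelines = [x for _, x in sorted(zip(index_shuf_old, filelines))]
--     elif param == 'new-cat':
--         filelines = [x for _, x in sorted(zip(index_shuf_new, filelines))]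
--     return filelines
-- ===== SOURCE B (Python) =====
-- def randomise_data(filelines, param):
--     # The index lists are 1..N in order, so the "sort" is the identity
--     # permutation; zip only truncates to min(N, len(filelines)).
--     if param == 'all-cat':
--         return filelines[:1862]
--     if param == 'old-cat':
--         return filelines[:971]
--     if param == 'new-cat':
--         return filelines[:891]
--     return filelines
-- ===== Notes on version B (the rewrite author's own statement) =====
-- stated objective: simpler
-- what changed: B drops the zip-sort-extract pipeline entirely: since the index lists are already strictly increasing, sorting is the identity and zip only truncates, so each branch is a plain slice filelines[:N].
import Mathlib
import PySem

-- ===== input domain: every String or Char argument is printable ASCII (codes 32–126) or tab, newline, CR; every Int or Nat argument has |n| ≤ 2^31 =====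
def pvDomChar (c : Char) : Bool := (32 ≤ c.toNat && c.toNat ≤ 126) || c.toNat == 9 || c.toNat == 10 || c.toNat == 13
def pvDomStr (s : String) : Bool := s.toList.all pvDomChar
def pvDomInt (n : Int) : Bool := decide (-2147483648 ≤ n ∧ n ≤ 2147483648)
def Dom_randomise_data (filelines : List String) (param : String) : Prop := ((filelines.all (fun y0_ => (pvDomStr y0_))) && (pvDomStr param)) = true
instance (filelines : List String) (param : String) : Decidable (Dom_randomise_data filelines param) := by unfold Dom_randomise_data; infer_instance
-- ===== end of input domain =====

-- B replaces A's zip / sort / extract pipeline with direct slices: the index lists are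
-- strictly increasing, so the sort is the identity and zip only truncates (objective: simpler).


-- ===== PORT A =====
def index_shuf_all : List Int := PySem.List.pyRange 1 1863
def index_shuf_old : List Int := PySem.List.pyRange 1 972
def index_shuf_new : List Int := PySem.List.pyRange 1 892

def randomise_data (filelines : List String) (param : String) : List String :=
  if param = "all-cat" then
    (PySem.List.sorted2 (index_shuf_all.zip filelines) (fun p => p.1) (fun p => p.2)).map (fun p => p.2)
  else if param = "old-cat" then
    (PySem.List.sorted2 (index_shuf_old.zip filelines) (fun p => p.1) (fun p => p.2)).map (fun p => p.2)
  else if param = "new-cat" then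
    (PySem.List.sorted2 (index_shuf_new.zip filelines) (fun p => p.1) (fun p => p.2)).map (fun p => p.2)
  else filelines

-- ===== PORT B =====
def randomise_data_alt (filelines : List String) (param : String) : List String :=
  if param = "all-cat" then filelines.take 1862
  else if param = "old-cat" then filelines.take 971
  else if param = "new-cat" then filelines.take 891
  else filelines

-- ===== PRECONDITION & SPEC =====
def Spec_randomise_data (filelines : List String) (param : String) (out : List String) : Prop := out = randomise_data_alt filelines param
instance (filelines : List String) (param : String) (out : List String) : Decidable (Spec_randomise_data filelines param out) := by unfold Spec_randomise_data; infer_instance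

-- ===== CLAIM (what is proved, stated in full; the proofs are below) =====
def Claim_equal_randomise_data : Prop := ∀ (filelines : List String) (param : String), Dom_randomise_data filelines param → Spec_randomise_data filelines param (randomise_data filelines param)

-- ===== LEMMAS AND PROOFS =====

-- Insertion sort of a list already strictly ordered by `before` is the identity.
theorem foldl_insertBy_id {α : Type} (before : α → α → Bool) :
    ∀ (xs : List α), xs.Pairwise (fun a b => before b a = false) →
    xs.foldl (fun acc x => PySem.List.insertBy before x acc) [] = xs := by
  intro xs h
  induction xs using List.reverseRecOn with
  | nil => rfl
  | append_singleton ys y ih =>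
    rw [List.pairwise_append] at h
    rw [List.foldl_append, List.foldl_cons, List.foldl_nil, ih h.1]
    exact PySem.List.insertBy_of_forall_not_before before y ys
      (fun a ha => h.2.2 a ha y (by simp))

-- Pairwise on the first components of a zip, from pairwise on the first list.
theorem pairwise_zip_fst {α β : Type} {R : α → α → Prop} :
    ∀ (l1 : List α) (l2 : List β), l1.Pairwise R →
    (l1.zip l2).Pairwise (fun a b => R a.1 b.1) := by
  intro l1
  induction l1 with
  | nil => intro l2 _; simp
  | cons x t ih =>
    intro l2 h
    cases l2 with
    | nil => simp
    | cons y u =>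
      rw [List.pairwise_cons] at h
      refine List.pairwise_cons.mpr ⟨?_, ih u h.2⟩
      intro p hp
      exact h.1 p.1 (List.of_mem_zip hp).1

-- pyRange 1 n (step 1) is strictly increasing.
theorem pyRange_one_pairwise_lt (n : Int) :
    (PySem.List.pyRange 1 n).Pairwise (· < ·) := by
  rw [PySem.List.pyRange_of_pos 1 n (by norm_num)]
  rw [List.pairwise_map]
  refine (List.pairwise_lt_range).imp ?_
  intro a b hab
  omega

-- The seconds of a zip form a take of the second list.
theorem map_snd_zip_eq_take {α β : Type} :
    ∀ (l1 : List α) (l2 : List β), (l1.zip l2).map Prod.snd = l2.take l1.length := by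
  intro l1
  induction l1 with
  | nil => intro l2; simp
  | cons x t ih =>
    intro l2
    cases l2 with
    | nil => simp
    | cons y u => simp [ih]

-- The key lemma: A's zip-sort-extract over pyRange 1 n is a plain take.
theorem sorted2_zip_pyRange (n : Int) (hn : 0 < n) (xs : List String) :
    (PySem.List.sorted2 ((PySem.List.pyRange 1 n).zip xs)
        (fun p => p.1) (fun p => p.2)).map (fun p => p.2) = xs.take (n - 1).toNat := by
  have hpair : ((PySem.List.pyRange 1 n).zip xs).Pairwise
      (fun (a b : Int × String) => a.1 < b.1) :=
    pairwise_zip_fst _ _ (pyRange_one_pairwise_lt n)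
  have hid : PySem.List.sorted2 ((PySem.List.pyRange 1 n).zip xs)
      (fun p => p.1) (fun p => p.2) = (PySem.List.pyRange 1 n).zip xs := by
    show List.foldl _ [] _ = _
    refine foldl_insertBy_id _ _ (hpair.imp ?_)
    intro a b hab
    simp [decide_eq_false (by omega : ¬ b.1 < a.1), decide_eq_true hab]
  rw [hid]
  have hlen : (PySem.List.pyRange 1 n).length = (n - 1).toNat := by
    rw [PySem.List.pyRange_of_pos 1 n (by norm_num)]
    simp only [List.length_map, List.length_range]
    split
    · omega
    · omega
  rw [show ((PySem.List.pyRange 1 n).zip xs).map (fun p : Int × String => p.2)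
        = ((PySem.List.pyRange 1 n).zip xs).map Prod.snd from rfl,
      map_snd_zip_eq_take, hlen]

-- ===== VERDICT (by name: the statement is the Claim_ definition above) =====
theorem randomise_data_spec : Claim_equal_randomise_data := by
  intro filelines param _
  unfold Spec_randomise_data randomise_data randomise_data_alt
  unfold index_shuf_all index_shuf_old index_shuf_new
  split_ifs with h1 h2 h3
  · rw [sorted2_zip_pyRange 1863 (by norm_num) filelines]; norm_num; rfl
  · rw [sorted2_zip_pyRange 972 (by norm_num) filelines]; norm_num; rfl
  · rw [sorted2_zip_pyRange 892 (by norm_num) filelines]; norm_num; rfl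
  · rfl
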